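-- pv_equiv track=rewrite | github.com/shigetosidumeda-cyber/autonomath-mcp | src/jpintel_mcp/api/intel_houjin_full.py | _is_jurisdiction_consistent
-- ===== SOURCE A (Python) =====
-- def _is_jurisdiction_consistent(
--     registered: str | None,
--     invoice: str | None,
--     operational: list[str],
-- ) -> bool:
--     """True iff registered/invoice/operational all agree (or are empty).
--
--     A True here is "no discrepancy detected in the public corpus" — never
--     a positive 与信 signal on its own. A False is an audit-worthy flag.
--     """
--     seen = {p for p in (registered, invoice) if p}
--     seen.update(p for p in operational if p)
--     return len(seen) <= 1
-- ===== SOURCE B (Python) =====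
-- def _is_jurisdiction_consistent(
--     registered,
--     invoice,
--     operational,
-- ):
--     """True iff registered/invoice/operational all agree (or are empty)."""
--     ref = None
--     for v in (registered, invoice, *operational):
--         if not v:
--             continue
--         if ref is None:
--             ref = v
--         elif v != ref:
--             return False
--     return True
-- ===== Notes on version B (the rewrite author's own statement) =====
-- stated objective: simpler
-- what changed: Replaces the build-a-set-and-count-it approach with a single pass over the chained values that tracks one scalar reference and returns False on the first disagreeing non-empty value.
import Mathlib
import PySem

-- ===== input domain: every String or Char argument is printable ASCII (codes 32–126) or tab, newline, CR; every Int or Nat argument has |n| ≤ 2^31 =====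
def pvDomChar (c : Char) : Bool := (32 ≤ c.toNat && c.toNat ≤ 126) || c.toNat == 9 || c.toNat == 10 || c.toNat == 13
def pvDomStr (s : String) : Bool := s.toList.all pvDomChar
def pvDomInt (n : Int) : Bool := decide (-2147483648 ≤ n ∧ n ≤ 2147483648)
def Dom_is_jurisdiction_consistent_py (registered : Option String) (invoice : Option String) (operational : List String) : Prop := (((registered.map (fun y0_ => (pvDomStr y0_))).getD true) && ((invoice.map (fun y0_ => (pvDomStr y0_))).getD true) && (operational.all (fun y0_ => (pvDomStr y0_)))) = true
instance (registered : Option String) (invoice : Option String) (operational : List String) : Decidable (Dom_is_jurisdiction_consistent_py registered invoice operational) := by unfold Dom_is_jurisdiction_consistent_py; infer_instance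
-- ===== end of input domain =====

-- B replaces A's "collect non-empty values into a set and check its size ≤ 1" by a single
-- early-exit scan tracking one scalar reference value (objective: simpler).


-- ===== PORT A =====
def is_jurisdiction_consistent_py (registered : Option String) (invoice : Option String) (operational : List String) : Bool :=
  -- seen = {p for p in (registered, invoice) if p}
  let seen : PySem.Set String :=
    PySem.Set.ofList (([registered, invoice].filterMap id).filter (fun p => !(p == "")))
  -- seen.update(p for p in operational if p)
  let seen := PySem.Set.update seen (operational.filter (fun p => !(p == "")))
  -- return len(seen) <= 1
  decide (seen.length ≤ 1)

-- ===== PORT B =====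
-- B's loop over the chained values (registered, invoice, *operational), carrying the scalar ref.
def jurLoop : Option String → List (Option String) → Bool
  | _, [] => true
  | ref, v :: rest =>
    match v with
    | none => jurLoop ref rest            -- `not v`: None falls through
    | some s =>
      if s == "" then jurLoop ref rest    -- `not v`: empty string falls through
      else
        match ref with
        | none => jurLoop (some s) rest   -- first non-empty value: record it
        | some r => if s == r then jurLoop ref rest else false  -- early exit on mismatch

def is_jurisdiction_consistent_py_alt (registered : Option String) (invoice : Option String) (operational : List String) : Bool :=
  jurLoop none (registered :: invoice :: operational.map some)

-- ===== PRECONDITION & SPEC =====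
def Spec_is_jurisdiction_consistent_py (registered : Option String) (invoice : Option String) (operational : List String) (out : Bool) : Prop := out = is_jurisdiction_consistent_py_alt registered invoice operational
instance (registered : Option String) (invoice : Option String) (operational : List String) (out : Bool) : Decidable (Spec_is_jurisdiction_consistent_py registered invoice operational out) := by unfold Spec_is_jurisdiction_consistent_py; infer_instance

-- ===== CLAIM (what is proved, stated in full; the proofs are below) =====
def Claim_equal_is_jurisdiction_consistent_py : Prop := ∀ (registered : Option String) (invoice : Option String) (operational : List String), Dom_is_jurisdiction_consistent_py registered invoice operational → Spec_is_jurisdiction_consistent_py registered invoice operational (is_jurisdiction_consistent_py registered invoice operational)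

-- ===== LEMMAS AND PROOFS =====

-- proof-side unified step: what A does to its set for one chained value
def jstep (s : PySem.Set String) (v : Option String) : PySem.Set String :=
  match v with
  | none => s
  | some x => if x == "" then s else PySem.Set.add s x

lemma filter_foldl_add (xs : List String) (s : PySem.Set String) :
    (xs.filter (fun p => !(p == ""))).foldl PySem.Set.add s = (xs.map some).foldl jstep s := by
  induction xs generalizing s with
  | nil => rfl
  | cons x xs ih =>
    by_cases hx : x = ""
    · simp [hx, jstep, ih]
    · simp [List.filter_cons, hx, jstep, ih]

lemma A_eq_fold (r i : Option String) (op : List String) :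
    is_jurisdiction_consistent_py r i op
      = decide (((r :: i :: op.map some).foldl jstep []).length ≤ 1) := by
  have h := filter_foldl_add op
  cases r with
  | none =>
    cases i with
    | none => simp [is_jurisdiction_consistent_py, PySem.Set.update, PySem.Set.ofList_eq_foldl, jstep, h]
    | some b =>
      by_cases hb : b = "" <;>
        simp [is_jurisdiction_consistent_py, PySem.Set.update, PySem.Set.ofList_eq_foldl,
          List.filter_nil, jstep, hb, h, beq_iff_eq]
  | some a =>
    cases i with
    | none =>
      by_cases ha : a = "" <;>
        simp [is_jurisdiction_consistent_py, PySem.Set.update, PySem.Set.ofList_eq_foldl,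
          List.filter_nil, jstep, ha, h, beq_iff_eq]
    | some b =>
      by_cases ha : a = "" <;> by_cases hb : b = "" <;>
        simp [is_jurisdiction_consistent_py, PySem.Set.update, PySem.Set.ofList_eq_foldl,
          List.filter_nil, jstep, ha, hb, h, beq_iff_eq]

lemma jstep_length_mono (ws : List (Option String)) (s : PySem.Set String) :
    s.length ≤ (ws.foldl jstep s).length := by
  induction ws generalizing s with
  | nil => simp
  | cons v ws ih =>
    refine le_trans ?_ (ih (jstep s v))
    cases v with
    | none => simp [jstep]
    | some x =>
      simp only [jstep]
      split_ifs
      · rfl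
      · unfold PySem.Set.add
        split_ifs <;> simp

lemma loop_eq_fold (ws : List (Option String)) :
    ∀ s : PySem.Set String, s.length ≤ 1 →
      jurLoop s.head? ws = decide ((ws.foldl jstep s).length ≤ 1) := by
  induction ws with
  | nil => intro s hs; simp [jurLoop, hs]
  | cons v ws ih =>
    intro s hs
    cases v with
    | none => simpa [jurLoop, jstep] using ih s hs
    | some x =>
      by_cases hx : x = ""
      · simpa [jurLoop, hx, jstep] using ih s hs
      · match s, hs with
        | [], _ =>
          have := ih [x] (by simp)
          simpa [jurLoop, hx, jstep, PySem.Set.add, PySem.Set.empty] using this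
        | [r], _ =>
          by_cases hxr : x = r
          · have := ih [r] (by simp)
            simp only [jurLoop, List.head?] at this ⊢
            rw [if_neg (by simpa using hx), if_pos (by simpa using hxr)]
            rw [this, List.foldl_cons]
            have hadd : jstep [r] (some x) = [r] := by
              simp [jstep, hxr, PySem.Set.add, PySem.Set.contains]
            rw [hadd]
          · have h2 : (2 : Nat) ≤ ((ws.foldl jstep (jstep [r] (some x)))).length := by
              have hadd : jstep [r] (some x) = [r, x] := by
                simp [jstep, hx, PySem.Set.add, PySem.Set.contains, hxr]
              rw [hadd]
              simpa using jstep_length_mono ws [r, x]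
            simp only [jurLoop, List.head?]
            rw [if_neg (by simpa using hx), if_neg (by simpa using hxr)]
            rw [List.foldl_cons]
            symm
            simpa using by omega

-- ===== VERDICT (by name: the statement is the Claim_ definition above) =====
theorem is_jurisdiction_consistent_py_spec : Claim_equal_is_jurisdiction_consistent_py := by
  intro r i op _
  unfold Spec_is_jurisdiction_consistent_py
  rw [A_eq_fold]
  have := loop_eq_fold (r :: i :: op.map some) [] (by simp)
  simpa [is_jurisdiction_consistent_py_alt] using this.symm
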